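-- pv_equiv track=rewrite | github.com/Edinburgh-Genome-Foundry/OT2Metclo | metclo_plan.py | _volumecheck
-- ===== SOURCE A (Python) =====
-- import csv, math, string
--
-- def _volumecheck(i, x):
--     wellvolume = []
--     plate = []
--     count = 0
--     if x / 200 < 1:
--         plate.append(i)
--         count += 1
--         wellvolume.append(x)
--     else:
--         wells = math.ceil(x / 200)
--         for j in range(wells):
--             if x - 200 > 0:
--                 wellvolume.append(200)
--                 x = x - 200
--             else:
--                 wellvolume.append(x)
--         for t in range(wells):
--             plate.append(i + "." + str(t + 1))
--             count += 1
--     return plate, wellvolume, count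
-- ===== SOURCE B (Python) =====
-- def _volumecheck(i, x):
--     if x < 200:
--         return [i], [x], 1
--     # single fused pass: no precomputed well count, no float ceil; peel off
--     # full 200-unit wells while more than 200 remains, then one last well
--     # with whatever is left (200 exactly when x is a multiple of 200).
--     plate = []
--     wellvolume = []
--     k = 0
--     rem = x
--     while rem > 200:
--         k += 1
--         plate.append(i + "." + str(k))
--         wellvolume.append(200)
--         rem -= 200
--     k += 1
--     plate.append(i + "." + str(k))
--     wellvolume.append(rem)
--     return plate, wellvolume, k
-- ===== Notes on version B (the rewrite author's own statement) =====
-- stated objective: alternative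
-- what changed: Replaces A's two staged passes driven by a precomputed float ceiling (math.ceil(x/200) iterations mutating x to emit volumes, then a second loop emitting labels and count) with a single fused while-loop that peels 200 off a remainder, emitting each well's label and volume together and discovering the well count as it goes, with no ceil computation at all.
import Mathlib
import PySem

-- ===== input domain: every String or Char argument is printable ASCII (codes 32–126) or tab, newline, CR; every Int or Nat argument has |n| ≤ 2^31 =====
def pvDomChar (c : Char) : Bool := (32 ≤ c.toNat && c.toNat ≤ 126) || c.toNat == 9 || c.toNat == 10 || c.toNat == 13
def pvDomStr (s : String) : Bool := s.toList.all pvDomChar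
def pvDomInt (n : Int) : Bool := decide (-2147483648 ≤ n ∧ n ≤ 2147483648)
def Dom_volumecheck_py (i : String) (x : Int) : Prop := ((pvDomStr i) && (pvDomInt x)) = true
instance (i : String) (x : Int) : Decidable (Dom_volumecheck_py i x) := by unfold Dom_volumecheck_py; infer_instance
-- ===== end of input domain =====

-- B replaces A's two staged ceil-driven loops with one fused while-loop that peels 200 off a
-- remainder, emitting label and volume together and discovering the count (objective: alternative).

-- ===== PORT A =====
def volumecheck_py (i : String) (x : Int) : List String × List Int × Int :=
  let wellvolume : List Int := []
  let plate : List String := []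
  let count : Int := 0
  -- 'x / 200 < 1' is Python float true division; for integer x with |x| ≤ 2^31 it is exactly 'x < 200'
  if x < 200 then
    (plate ++ [i], wellvolume ++ [x], count + 1)
  else
    -- 'math.ceil(x / 200)': for integer x with |x| ≤ 2^31 the float division is exact enough that
    -- the ceiling equals the integer ceiling -((-x) // 200)
    let wells : Int := -(PySem.Int.floordiv (-x) 200)
    let wv_x : List Int × Int :=
      (PySem.List.pyRange 0 wells 1).foldl
        (fun (st : List Int × Int) _j =>
          if st.2 - 200 > 0 then (st.1 ++ [200], st.2 - 200) else (st.1 ++ [st.2], st.2))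
        (wellvolume, x)
    let pc : List String × Int :=
      (PySem.List.pyRange 0 wells 1).foldl
        (fun (st : List String × Int) t => (st.1 ++ [i ++ "." ++ PySem.Int.toStr (t + 1)], st.2 + 1))
        (plate, count)
    (pc.1, wv_x.1, pc.2)

-- ===== PORT B =====
-- B's while-loop: accumulators plate/vols, label counter k, remaining volume rem
def pvB_loop (i : String) (rem k : Int) (plate : List String) (vols : List Int) :
    List String × List Int × Int :=
  if h : rem > 200 then
    pvB_loop i (rem - 200) (k + 1) (plate ++ [i ++ "." ++ PySem.Int.toStr (k + 1)]) (vols ++ [(200 : Int)])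
  else
    (plate ++ [i ++ "." ++ PySem.Int.toStr (k + 1)], vols ++ [rem], k + 1)
termination_by rem.toNat
decreasing_by omega

def volumecheck_py_alt (i : String) (x : Int) : List String × List Int × Int :=
  if x < 200 then
    ([i], [x], 1)
  else
    pvB_loop i x 0 [] []

-- ===== PRECONDITION & SPEC =====
def Spec_volumecheck_py (i : String) (x : Int) (out : List String × List Int × Int) : Prop := out = volumecheck_py_alt i x
instance (i : String) (x : Int) (out : List String × List Int × Int) : Decidable (Spec_volumecheck_py i x out) := by unfold Spec_volumecheck_py; infer_instance

-- ===== CLAIM (what is proved, stated in full; the proofs are below) =====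
def Claim_equal_volumecheck_py : Prop := ∀ (i : String) (x : Int), Dom_volumecheck_py i x → Spec_volumecheck_py i x (volumecheck_py i x)

-- ===== LEMMAS AND PROOFS =====

-- a fold whose step ignores the list element is an iterate of the step
theorem pv_foldl_ignore {α β : Type} (f : β → β) :
    ∀ (l : List α) (init : β), l.foldl (fun s _ => f s) init = f^[l.length] init := by
  intro l
  induction l with
  | nil => intro init; rfl
  | cons a t ih =>
      intro init
      simp [List.foldl_cons, ih, Function.iterate_succ_apply]

-- A's plate/count loop appends the mapped elements and counts the length
theorem pv_plate_fold (i : String) :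
    ∀ (l : List Int) (p : List String) (c : Int),
      l.foldl (fun (st : List String × Int) t => (st.1 ++ [i ++ "." ++ PySem.Int.toStr (t + 1)], st.2 + 1)) (p, c)
        = (p ++ l.map (fun t => i ++ "." ++ PySem.Int.toStr (t + 1)), c + l.length) := by
  intro l
  induction l with
  | nil => intro p c; simp
  | cons a t ih =>
      intro p c
      simp [List.foldl_cons, ih]
      omega

-- A's subtract-and-append step, iterated n+1 times from x with 200*n < x ≤ 200*(n+1)
theorem pv_wv_iter :
    ∀ (n : Nat) (acc : List Int) (x : Int), 200 * (n : Int) < x → x ≤ 200 * ((n : Int) + 1) →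
      (fun (st : List Int × Int) =>
        if st.2 - 200 > 0 then (st.1 ++ [200], st.2 - 200) else (st.1 ++ [st.2], st.2))^[n + 1] (acc, x)
        = (acc ++ List.replicate n 200 ++ [x - 200 * (n : Int)], x - 200 * (n : Int)) := by
  intro n
  induction n with
  | zero =>
      intro acc x h1 h2
      push_cast at h2
      simp
      omega
  | succ m ih =>
      intro acc x h1 h2
      have hgt : x - 200 > 0 := by push_cast at h1; omega
      rw [Function.iterate_succ_apply]
      simp only [hgt, if_pos]
      rw [ih (acc ++ [200]) (x - 200) (by push_cast at h1 ⊢; omega) (by push_cast at h2 ⊢; omega)]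
      have hx : x - 200 - 200 * (m : Int) = x - 200 * (((m + 1 : Nat) : Int)) := by push_cast; ring
      rw [hx, List.replicate_succ]
      simp

-- B's while loop, run to completion from a remainder with 200*n < rem ≤ 200*(n+1)
theorem pvB_loop_eq (i : String) :
    ∀ (n : Nat) (rem k : Int) (p : List String) (v : List Int),
      200 * (n : Int) < rem → rem ≤ 200 * ((n : Int) + 1) →
      pvB_loop i rem k p v
        = (p ++ (List.range (n + 1)).map (fun t : Nat => i ++ "." ++ PySem.Int.toStr (k + (t : Int) + 1)),
           v ++ List.replicate n 200 ++ [rem - 200 * (n : Int)],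
           k + (n : Int) + 1) := by
  intro n
  induction n with
  | zero =>
      intro rem k p v h1 h2
      push_cast at h2
      have hnot : ¬ rem > 200 := by omega
      rw [pvB_loop]
      simp [hnot]
  | succ m ih =>
      intro rem k p v h1 h2
      have hgt : rem > 200 := by push_cast at h1; omega
      rw [pvB_loop]
      simp only [hgt, dif_pos]
      rw [ih (rem - 200) (k + 1) _ _ (by push_cast at h1 ⊢; omega) (by push_cast at h2 ⊢; omega)]
      refine congrArg₂ _ ?_ (congrArg₂ _ ?_ ?_)
      · conv_rhs => rw [List.range_succ_eq_map, List.map_cons, List.map_map]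
        simp only [List.append_assoc, List.singleton_append, Nat.cast_zero, add_zero]
        congr 2
        apply List.map_congr_left
        intro t _
        simp only [Function.comp]
        push_cast
        ring_nf
      · rw [List.replicate_succ]
        have : rem - 200 - 200 * (m : Int) = rem - 200 * (((m + 1 : Nat) : Int)) := by push_cast; ring
        simp [this]
      · push_cast; ring

-- ===== VERDICT (by name: the statement is the Claim_ definition above) =====
theorem volumecheck_py_spec : Claim_equal_volumecheck_py := by
  intro i x _
  unfold Spec_volumecheck_py volumecheck_py volumecheck_py_alt
  by_cases hlt : x < 200
  · simp [hlt]
  · simp only [hlt, if_neg, not_false_iff]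
    set wells : Int := -(PySem.Int.floordiv (-x) 200) with hw
    have hb : (wells - 1) * 200 < x ∧ x ≤ wells * 200 :=
      (PySem.Int.neg_floordiv_neg_eq_iff_of_pos (a := x) (b := 200) (q := wells) (by norm_num)).mp hw.symm
    have hw1 : 1 ≤ wells := by nlinarith [hb.1, hb.2]
    have hlen : (PySem.List.pyRange 0 wells 1).length = wells.toNat := by
      rw [PySem.List.length_pyRange_one]; congr 1; omega
    obtain ⟨n, hn⟩ : ∃ n : Nat, wells.toNat = n + 1 := ⟨wells.toNat - 1, by omega⟩
    have hwn : wells = ((n : Int) + 1) := by omega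
    have hx1 : 200 * (n : Int) < x := by nlinarith [hb.1]
    have hx2 : x ≤ 200 * ((n : Int) + 1) := by nlinarith [hb.2]
    rw [pv_foldl_ignore, hlen, hn, pv_wv_iter n [] x hx1 hx2, pv_plate_fold, hlen,
        pvB_loop_eq i n x 0 [] [] hx1 hx2]
    have hplate : (PySem.List.pyRange 0 wells 1).map (fun t => i ++ "." ++ PySem.Int.toStr (t + 1))
        = (List.range (n + 1)).map (fun t : Nat => i ++ "." ++ PySem.Int.toStr (0 + (t : Int) + 1)) := by
      rw [PySem.List.pyRange_one]
      simp only [Int.sub_zero, hn, List.map_map]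
      apply List.map_congr_left
      intro t _
      simp only [Function.comp]
    rw [hplate]
    simp [hwn]
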